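-- pv_equiv track=rewrite | github.com/isi-usc-edu/pyLIQTR | Examples/LS-FABLE_block_encoding/fable_functions.py | gray_digit
-- ===== SOURCE A (Python) =====
-- def gray_digit(n):
-- 	v=[]
-- 	for k in range(1,2*n+1):
-- 		v1=v[:]
-- 		v.append(k)
-- 		v.extend(v1)
-- 	v.append(2*n)
-- 	return(v)
-- ===== SOURCE B (Python) =====
-- def gray_digit(n):
--     total = 2 * n
--     if n < 1:
--         return [total]
--     out = []
--     for i in range(1, 2 ** total):
--         r = 1
--         while i % 2 == 0:
--             i //= 2
--             r += 1
--         out.append(r)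
--     out.append(total)
--     return out
-- ===== Notes on version B (the rewrite author's own statement) =====
-- stated objective: alternative
-- what changed: B computes each element directly from its index as the ruler function (trailing zeros of i plus 1), replacing A's copy-doubling recurrence that repeatedly duplicates the whole list.
import Mathlib
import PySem

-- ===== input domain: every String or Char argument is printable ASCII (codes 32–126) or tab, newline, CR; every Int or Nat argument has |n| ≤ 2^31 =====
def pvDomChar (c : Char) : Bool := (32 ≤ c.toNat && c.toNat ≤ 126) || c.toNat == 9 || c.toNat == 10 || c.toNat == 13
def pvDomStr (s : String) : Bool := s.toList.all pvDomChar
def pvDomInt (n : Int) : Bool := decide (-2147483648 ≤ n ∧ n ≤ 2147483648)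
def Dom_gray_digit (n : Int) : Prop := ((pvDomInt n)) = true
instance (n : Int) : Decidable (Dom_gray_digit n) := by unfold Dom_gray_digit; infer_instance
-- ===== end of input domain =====

-- B replaces A's copy-doubling recurrence by computing each element directly from its
-- index as the ruler function (trailing zeros + 1); objective: alternative algorithm.

-- ===== PORT A =====
def gray_digit (n : Int) : List Int :=
  let v := (PySem.List.pyRange 1 (2*n+1) 1).foldl (fun v k => (v ++ [k]) ++ v) []
  v ++ [2*n]

-- ===== PORT B =====
-- inner 'while i % 2 == 0: i //= 2; r += 1' of Source B; the 'i ≠ 0' conjunct is only a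
-- totality guard (the loop is entered with i ≥ 1, where it changes nothing)
def rulerGo (i : Nat) (r : Int) : Int :=
  if _h : i % 2 = 0 ∧ i ≠ 0 then rulerGo (i / 2) (r + 1) else r
termination_by i
decreasing_by exact Nat.div_lt_self (Nat.pos_of_ne_zero _h.2) (by norm_num)

def gray_digit_alt (n : Int) : List Int :=
  let total := 2 * n
  if n < 1 then [total]
  else
    -- range(1, 2**total); i ≥ 1 here so i.toNat is exact
    ((PySem.List.pyRange 1 ((2:Int)^total.toNat) 1).map (fun i => rulerGo i.toNat 1)) ++ [total]

-- ===== PRECONDITION & SPEC =====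
def Spec_gray_digit (n : Int) (out : List Int) : Prop := out = gray_digit_alt n
instance (n : Int) (out : List Int) : Decidable (Spec_gray_digit n out) := by unfold Spec_gray_digit; infer_instance

-- ===== CLAIM (what is proved, stated in full; the proofs are below) =====
def Claim_equal_gray_digit : Prop := ∀ (n : Int), Dom_gray_digit n → Spec_gray_digit n (gray_digit n)

-- ===== LEMMAS AND PROOFS =====

-- the ruler/doubling sequence both programs build
def rulerList : Nat → List Int
  | 0 => []
  | m + 1 => (rulerList m ++ [(m : Int) + 1]) ++ rulerList m

lemma foldl_pyRange_rulerList (m : Nat) :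
    (PySem.List.pyRange 1 ((m : Int) + 1) 1).foldl (fun v k => (v ++ [k]) ++ v) [] = rulerList m := by
  induction m with
  | zero => simp [PySem.List.pyRange_one_eq_nil, rulerList]
  | succ m ih =>
    have h : (1 : Int) ≤ (m : Int) + 1 := by omega
    rw [show ((m + 1 : Nat) : Int) + 1 = ((m : Int) + 1) + 1 by push_cast; ring,
        PySem.List.pyRange_one_succ_right h, List.foldl_append, ih]
    simp [rulerList]

lemma rulerGo_pow (m : Nat) (r : Int) : rulerGo (2 ^ m) r = r + m := by
  induction m generalizing r with
  | zero => rw [rulerGo]; simp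
  | succ m ih =>
    rw [rulerGo]
    have h2 : (2:Nat) ^ (m + 1) % 2 = 0 ∧ (2:Nat) ^ (m + 1) ≠ 0 := by
      constructor
      · simp [pow_succ, Nat.mul_mod_left]
      · positivity
    rw [dif_pos h2, show (2:Nat) ^ (m + 1) / 2 = 2 ^ m by
      rw [pow_succ]; exact Nat.mul_div_cancel _ (by norm_num), ih]
    push_cast; ring

lemma rulerGo_add_pow (m : Nat) : ∀ j r, 1 ≤ j → j < 2 ^ m → rulerGo (2 ^ m + j) r = rulerGo j r := by
  induction m with
  | zero => intro j r h1 h2; omega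
  | succ m ih =>
    intro j r h1 h2
    by_cases hj : j % 2 = 0
    · obtain ⟨j', rfl⟩ : ∃ j', j = 2 * j' := ⟨j / 2, by omega⟩
      have hp : (2:Nat) ^ (m + 1) = 2 * 2 ^ m := by rw [pow_succ]; ring
      rw [rulerGo]
      rw [dif_pos ⟨by omega, by omega⟩]
      have hdiv : (2 ^ (m + 1) + 2 * j') / 2 = 2 ^ m + j' := by omega
      rw [hdiv, ih j' (r + 1) (by omega) (by omega)]
      conv_rhs => rw [rulerGo]
      rw [dif_pos ⟨by omega, by omega⟩]
      congr 1
      omega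
    · have ho : (2 ^ (m + 1) + j) % 2 = 1 := by
        have : (2:Nat) ^ (m + 1) % 2 = 0 := by simp [pow_succ, Nat.mul_mod_left]
        omega
      conv_lhs => rw [rulerGo]
      conv_rhs => rw [rulerGo]
      rw [dif_neg (by omega), dif_neg (by omega)]

lemma range_map_rulerList (m : Nat) :
    (List.range (2 ^ m - 1)).map (fun k => rulerGo (k + 1) 1) = rulerList m := by
  induction m with
  | zero => simp [rulerList]
  | succ m ih =>
    have hp : (1:Nat) ≤ 2 ^ m := Nat.one_le_two_pow
    have hsplit : (2:Nat) ^ (m + 1) - 1 = 2 ^ m + (2 ^ m - 1) := by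
      rw [pow_succ]; omega
    rw [hsplit, List.range_add, List.map_append, List.map_map]
    have hmid : (2:Nat) ^ m = (2 ^ m - 1) + 1 := by omega
    rw [show List.range (2 ^ m) = List.range ((2 ^ m - 1) + 1) by rw [← hmid],
        List.range_succ, List.map_append, ih]
    rw [show rulerList (m + 1) = (rulerList m ++ [(m : Int) + 1]) ++ rulerList m from rfl]
    congr 1
    · congr 1
      simp only [List.map_cons, List.map_nil]
      rw [show (2:Nat) ^ m - 1 + 1 = 2 ^ m by omega, rulerGo_pow]
      rw [Int.add_comm]
    · rw [← ih]
      apply List.map_congr_left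
      intro k hk
      simp only [List.mem_range] at hk
      simp only [Function.comp]
      rw [show 2 ^ m + k + 1 = 2 ^ m + (k + 1) by ring,
          rulerGo_add_pow m (k + 1) 1 (by omega) (by omega)]

lemma pyRange_map_rulerList (m : Nat) :
    (PySem.List.pyRange 1 ((2:Int) ^ m) 1).map (fun i => rulerGo i.toNat 1) = rulerList m := by
  rw [PySem.List.pyRange_one, List.map_map]
  have hN : (1:Nat) ≤ 2 ^ m := Nat.one_le_two_pow
  have h1 : ((2:Int) ^ m - 1).toNat = 2 ^ m - 1 := by
    have : (2:Int) ^ m = ((2 ^ m : Nat) : Int) := by push_cast; ring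
    omega
  rw [h1, ← range_map_rulerList m]
  apply List.map_congr_left
  intro k _
  simp only [Function.comp]
  congr 1
  omega

-- ===== VERDICT (by name: the statement is the Claim_ definition above) =====
theorem gray_digit_spec : Claim_equal_gray_digit := by
  intro n _
  unfold Spec_gray_digit gray_digit gray_digit_alt
  by_cases hn : n < 1
  · rw [if_pos hn, PySem.List.pyRange_one_eq_nil (by omega)]
    simp
  · rw [if_neg hn]
    have hm : (2 * n) = (((2 * n).toNat : Nat) : Int) := by omega
    simp only
    rw [show 2 * n + 1 = (((2 * n).toNat : Nat) : Int) + 1 by omega,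
        foldl_pyRange_rulerList, pyRange_map_rulerList]
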